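-- pv_equiv track=rewrite | github.com/MonashBioinformaticsPlatform/laxy | laxy_pipeline_apps/nf-core-rnaseq/templates/job_scripts/nf-core-rnaseq/default/input/scripts/laxy2nfcore_samplesheet.py | is_R1
-- ===== SOURCE A (Python) =====
-- from typing import Sequence, Union
--
-- extensions = [
--     ".fastq.gz",  # Typical Illumina extension
--     ".fq.gz",  # BGI currently uses .fq.gz. See, MGI isn't just a copy of Illumina tech !
--     ".fastq",  # IonTorrent tarballs contain uncompressed fastqs
--     ".fq",  # Someone will do this one day
--     ".fasta.gz",  # Very occasionally, we get FASTA format reads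
--     ".fa.gz",  # ... and this
--     ".fasta",
--     ".fa",
-- ]
--
-- def read_extension(fn) -> Union[None, str]:
--     for ext in extensions:
--         if fn.endswith(ext):
--             return ext
--     return None
--
-- def is_R1(fn) -> bool:
--     r1_suffixes = [
--         "_R1_001",
--         "_R1",
--         "_1",
--     ]
--     extn = read_extension(fn)
--     if extn is None:
--         return False
--     return any([fn.endswith(f"{suf}{extn}") for suf in r1_suffixes])
-- ===== SOURCE B (Python) =====
-- extensions = [
--     ".fastq.gz",
--     ".fq.gz",
--     ".fastq",
--     ".fq",
--     ".fasta.gz",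
--     ".fa.gz",
--     ".fasta",
--     ".fa",
-- ]
--
-- r1_suffixes = [
--     "_R1_001",
--     "_R1",
--     "_1",
-- ]
--
-- # Full cross-product of suffix+extension tails, built once at module level.
-- _r1_tails = [suf + ext for suf in r1_suffixes for ext in extensions]
--
-- def is_R1(fn) -> bool:
--     return any(fn.endswith(tail) for tail in _r1_tails)
-- ===== Notes on version B (the rewrite author's own statement) =====
-- stated objective: simpler
-- what changed: B precomputes the full cross-product of R1 suffixes and extensions as one module-level tail table and answers with a single any(endswith) pass, dropping the two-phase find-extension-then-check-suffix logic (valid since no extension is a suffix of another).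
import Mathlib
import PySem

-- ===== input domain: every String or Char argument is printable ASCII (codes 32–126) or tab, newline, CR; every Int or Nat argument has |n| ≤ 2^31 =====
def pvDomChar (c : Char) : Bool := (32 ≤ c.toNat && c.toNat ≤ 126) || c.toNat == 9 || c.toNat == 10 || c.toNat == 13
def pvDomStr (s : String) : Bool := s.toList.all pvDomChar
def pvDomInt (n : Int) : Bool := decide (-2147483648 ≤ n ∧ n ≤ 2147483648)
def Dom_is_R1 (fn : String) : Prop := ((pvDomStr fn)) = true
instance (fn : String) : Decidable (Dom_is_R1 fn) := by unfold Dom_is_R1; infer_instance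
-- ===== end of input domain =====

-- ===== PORT A =====
-- B builds the suffix+extension cross-product once and checks it in one pass; return-value equivalence proved on Dom.
def pvExtensions : List String :=
  [".fastq.gz", ".fq.gz", ".fastq", ".fq", ".fasta.gz", ".fa.gz", ".fasta", ".fa"]

-- A's read_extension: first extension fn ends with, else none
def pvReadExtLoop (fn : String) : List String → Option String
  | [] => none
  | e :: rest => if PySem.Str.endswith fn e then some e else pvReadExtLoop fn rest

def read_extension (fn : String) : Option String := pvReadExtLoop fn pvExtensions

def pvR1Suffixes : List String := ["_R1_001", "_R1", "_1"]

def is_R1 (fn : String) : Bool :=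
  match read_extension fn with
  | none => false
  | some extn => (pvR1Suffixes.map (fun suf => PySem.Str.endswith fn (suf ++ extn))).any id

-- ===== PORT B =====
def pvR1Tails : List String :=
  pvR1Suffixes.flatMap (fun suf => pvExtensions.map (fun ext => suf ++ ext))

def is_R1_alt (fn : String) : Bool :=
  pvR1Tails.any (fun tail => PySem.Str.endswith fn tail)

-- ===== PRECONDITION & SPEC =====
def Spec_is_R1 (fn : String) (out : Bool) : Prop := out = is_R1_alt fn
instance (fn : String) (out : Bool) : Decidable (Spec_is_R1 fn out) := by unfold Spec_is_R1; infer_instance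

-- ===== CLAIM (what is proved, stated in full; the proofs are below) =====
def Claim_equal_is_R1 : Prop := ∀ (fn : String), Dom_is_R1 fn → Spec_is_R1 fn (is_R1 fn)

-- ===== LEMMAS AND PROOFS =====

-- no extension of the list is a (list-of-chars) suffix of a different one
theorem pvExt_pair : ∀ e1 ∈ pvExtensions, ∀ e2 ∈ pvExtensions,
    e1.toList <:+ e2.toList → e1 = e2 := by decide

theorem pvExt_uniq {s : List Char} {e1 e2 : String}
    (h1 : e1 ∈ pvExtensions) (h2 : e2 ∈ pvExtensions)
    (hs1 : e1.toList <:+ s) (hs2 : e2.toList <:+ s) : e1 = e2 := by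
  rcases List.suffix_or_suffix_of_suffix hs1 hs2 with h | h
  · exact pvExt_pair e1 h1 e2 h2 h
  · exact (pvExt_pair e2 h2 e1 h1 h).symm

theorem pvLoop_mem {fn e : String} {l : List String}
    (h : pvReadExtLoop fn l = some e) :
    e ∈ l ∧ PySem.Str.endswith fn e = true := by
  induction l with
  | nil => simp [pvReadExtLoop] at h
  | cons a rest ih =>
    rw [pvReadExtLoop] at h
    by_cases ha : PySem.Str.endswith fn a = true
    · rw [if_pos ha] at h
      cases h
      exact ⟨List.mem_cons_self, ha⟩
    · rw [if_neg ha] at h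
      obtain ⟨hm, he⟩ := ih h
      exact ⟨List.mem_cons_of_mem _ hm, he⟩

theorem pvLoop_some {fn e : String} {l : List String}
    (hend : PySem.Str.endswith fn e = true) (he : e ∈ l)
    (huniq : ∀ e' ∈ l, PySem.Str.endswith fn e' = true → e' = e) :
    pvReadExtLoop fn l = some e := by
  induction l with
  | nil => cases he
  | cons a rest ih =>
    rw [pvReadExtLoop]
    by_cases ha : PySem.Str.endswith fn a = true
    · rw [if_pos ha, huniq a List.mem_cons_self ha]
    · rw [if_neg ha]
      have hne : e ≠ a := fun h => ha (h ▸ hend)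
      have he' : e ∈ rest := by
        rcases List.mem_cons.mp he with h | h
        · exact absurd h.symm hne.symm
        · exact h
      exact ih he' (fun e' h' => huniq e' (List.mem_cons_of_mem _ h'))

theorem pvEndswith_iff (fn t : String) :
    PySem.Str.endswith fn t = true ↔ t.toList <:+ fn.toList := by
  simp [PySem.Str.endswith_eq, PySem.Chars.endswith_iff]

theorem pvMain (fn : String) : is_R1 fn = is_R1_alt fn := by
  rw [Bool.eq_iff_iff]
  constructor
  · intro hA
    unfold is_R1 at hA
    cases hre : read_extension fn with
    | none => rw [hre] at hA; simp at hA
    | some extn =>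
      rw [hre] at hA
      simp only [List.any_map, List.any_eq_true] at hA
      obtain ⟨suf, hsuf, hend⟩ := hA
      obtain ⟨hmem, _⟩ := pvLoop_mem hre
      unfold is_R1_alt
      simp only [List.any_eq_true]
      refine ⟨suf ++ extn, ?_, by simpa using hend⟩
      unfold pvR1Tails
      simp only [List.mem_flatMap, List.mem_map]
      exact ⟨suf, hsuf, extn, hmem, rfl⟩
  · intro hB
    unfold is_R1_alt at hB
    simp only [List.any_eq_true] at hB
    obtain ⟨tail, htail, hend⟩ := hB
    unfold pvR1Tails at htail
    simp only [List.mem_flatMap, List.mem_map] at htail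
    obtain ⟨suf, hsuf, ext, hext, rfl⟩ := htail
    have hsufx : (suf ++ ext).toList <:+ fn.toList := (pvEndswith_iff _ _).mp hend
    have hextx : ext.toList <:+ fn.toList := by
      refine List.IsSuffix.trans ?_ hsufx
      simp [List.suffix_append]
    have hre : read_extension fn = some ext := by
      apply pvLoop_some ((pvEndswith_iff _ _).mpr hextx) hext
      intro e' h1 h2
      exact pvExt_uniq h1 hext ((pvEndswith_iff _ _).mp h2) hextx
    unfold is_R1
    rw [hre]
    simp only [List.any_map, List.any_eq_true]
    exact ⟨suf, hsuf, hend⟩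

-- ===== VERDICT (by name: the statement is the Claim_ definition above) =====
theorem is_R1_spec : Claim_equal_is_R1 := by
  intro fn _
  unfold Spec_is_R1
  exact pvMain fn
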